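-- pv_equiv track=rewrite | github.com/GogoManev/9-Homework | piton/тест/zad2.py | symmetricPairs
-- ===== SOURCE A (Python) =====
-- def symmetricPairs(arr):
--     result = []
--     for i in range(len(arr)):
--         for j in range(i+1, len(arr)):
--             if arr[i] == arr[j][::-1]:
--                 result.append(arr[i])
--                 result.append(arr[j])
--                 break
--     return result
-- ===== SOURCE B (Python) =====
-- def symmetricPairs(arr):
--     # last occurrence index of each string, built in one pass
--     last = {}
--     for idx, s in enumerate(arr):
--         last[s] = idx
--     result = []
--     for i, s in enumerate(arr):
--         r = s[::-1]
--         if last.get(r, -1) > i: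
--             result.append(s)
--             result.append(r)
--     return result
-- ===== Notes on version B (the rewrite author's own statement) =====
-- stated objective: faster
-- what changed: Replaces the quadratic nested scan (for each i, scan j>i for a string whose reverse is arr[i]) with one pass building a dict of each string's last index, then one pass testing last[reversed(s)] > i; the inner scan disappears.
import Mathlib
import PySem

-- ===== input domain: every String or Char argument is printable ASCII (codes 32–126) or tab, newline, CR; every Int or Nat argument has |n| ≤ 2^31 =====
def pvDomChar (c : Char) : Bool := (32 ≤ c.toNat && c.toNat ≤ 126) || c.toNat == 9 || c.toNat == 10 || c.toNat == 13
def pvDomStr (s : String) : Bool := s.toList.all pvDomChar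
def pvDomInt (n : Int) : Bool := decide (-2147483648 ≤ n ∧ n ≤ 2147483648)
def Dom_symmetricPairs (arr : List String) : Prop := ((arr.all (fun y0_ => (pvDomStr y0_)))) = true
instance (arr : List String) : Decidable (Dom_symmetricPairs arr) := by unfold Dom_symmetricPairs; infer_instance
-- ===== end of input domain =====

-- B replaces A's quadratic nested scan by a single pass over a dict of last-occurrence
-- indices (objective: faster; the inner j-scan disappears).

-- ===== PORT A =====
-- inner 'for j in range(i+1, len(arr)): if arr[i] == arr[j][::-1]: append; append; break'
def pvInnerA (arr : List String) (ai : String) (result : List String) : List Int → List String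
  | [] => result
  | j :: rest =>
      let aj := PySem.List.pyGetD arr j ""
      if ai = (PySem.Str.slice? aj none none (-1)).getD "" then
        (result ++ [ai]) ++ [aj]
      else pvInnerA arr ai result rest

def symmetricPairs (arr : List String) : List String :=
  (PySem.List.pyRange 0 (PySem.List.len arr) 1).foldl
    (fun result i =>
      pvInnerA arr (PySem.List.pyGetD arr i "") result
        (PySem.List.pyRange (i + 1) (PySem.List.len arr) 1))
    []

-- ===== PORT B =====
def symmetricPairs_alt (arr : List String) : List String :=
  let last : PySem.Dict String Int :=
    (PySem.List.enumerate arr 0).foldl (fun d p => d.insert p.2 p.1) PySem.Dict.empty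
  (PySem.List.enumerate arr 0).foldl
    (fun result p =>
      let r := (PySem.Str.slice? p.2 none none (-1)).getD ""
      if last.getD r (-1) > p.1 then (result ++ [p.2]) ++ [r] else result)
    []

-- ===== PRECONDITION & SPEC =====
def Spec_symmetricPairs (arr : List String) (out : List String) : Prop := out = symmetricPairs_alt arr
instance (arr : List String) (out : List String) : Decidable (Spec_symmetricPairs arr out) := by unfold Spec_symmetricPairs; infer_instance

-- ===== CLAIM (what is proved, stated in full; the proofs are below) =====
def Claim_equal_symmetricPairs : Prop := ∀ (arr : List String), Dom_symmetricPairs arr → Spec_symmetricPairs arr (symmetricPairs arr)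

-- ===== LEMMAS AND PROOFS =====

-- s[::-1] as a total function on strings
def pvRev (s : String) : String := String.ofList s.toList.reverse

theorem pvRev_slice (s : String) : (PySem.Str.slice? s none none (-1)).getD "" = pvRev s := by
  simp [PySem.Str.slice?_none_none_neg_one, pvRev]

theorem pvRev_invol (s : String) : pvRev (pvRev s) = s := by
  simp [pvRev, String.toList_ofList, String.ofList_toList]

theorem pvRev_eq_comm {a b : String} : a = pvRev b ↔ b = pvRev a := by
  constructor <;> (intro h; rw [h, pvRev_invol])

-- A's inner scan appends [ai, rev ai] iff some scanned index holds rev ai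
theorem pvInnerA_eq (arr : List String) (ai : String) :
    ∀ (js : List Int) (result : List String),
      pvInnerA arr ai result js =
        if ∃ j ∈ js, PySem.List.pyGetD arr j "" = pvRev ai
        then (result ++ [ai]) ++ [pvRev ai] else result := by
  intro js
  induction js with
  | nil => intro result; simp [pvInnerA]
  | cons j rest ih =>
      intro result
      simp only [pvInnerA, pvRev_slice]
      by_cases h : ai = pvRev (PySem.List.pyGetD arr j "")
      · have h' : PySem.List.pyGetD arr j "" = pvRev ai := pvRev_eq_comm.mp h
        rw [if_pos h, if_pos ⟨j, List.mem_cons_self, h'⟩, h']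
      · have h' : PySem.List.pyGetD arr j "" ≠ pvRev ai := fun hc => h (pvRev_eq_comm.mp hc)
        rw [if_neg h, ih]
        by_cases hex : ∃ x ∈ rest, PySem.List.pyGetD arr x "" = pvRev ai
        · rw [if_pos hex,
            if_pos (by rcases hex with ⟨x, hx, hv⟩; exact ⟨x, List.mem_cons_of_mem _ hx, hv⟩)]
        · rw [if_neg hex,
            if_neg (by
              rintro ⟨x, hx, hv⟩
              rcases List.mem_cons.mp hx with rfl | hx'
              exacts [h' hv, hex ⟨x, hx', hv⟩])]

-- the last-occurrence dict: getD v (-1) > i iff v occurs at some index > i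
theorem pvLast_getD_gt (xs : List String) (v : String) (i : Int) (hi : 0 ≤ i) :
    ((PySem.List.enumerate xs 0).foldl (fun d p => d.insert p.2 p.1)
        PySem.Dict.empty).getD v (-1) > i
      ↔ ∃ k : Nat, i < (k : Int) ∧ ∃ hk : k < xs.length, xs[k] = v := by
  induction xs using List.reverseRecOn with
  | nil =>
      simp [PySem.List.enumerate, PySem.Dict.getD_empty]
      omega
  | append_singleton ys x ih =>
      rw [PySem.List.enumerate_append]
      simp only [List.foldl_append, PySem.List.enumerate, List.foldl_cons, List.foldl_nil]
      rw [PySem.Dict.getD_insert]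
      by_cases hx : v = x
      · rw [if_pos hx]
        subst hx
        constructor
        · intro h
          refine ⟨ys.length, by omega, by simp, by simp⟩
        · rintro ⟨k, hik, hk, _⟩
          simp at hk
          omega
      · rw [if_neg hx, ih]
        constructor
        · rintro ⟨k, hik, hk, hv⟩
          refine ⟨k, hik, by simp; omega, ?_⟩
          rw [List.getElem_append_left hk]
          exact hv
        · rintro ⟨k, hik, hk, hv⟩
          simp at hk
          rcases Nat.lt_or_ge k ys.length with h | h
          · refine ⟨k, hik, h, ?_⟩
            rw [List.getElem_append_left h] at hv
            exact hv
          · exfalso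
            have hky : k = ys.length := by omega
            subst hky
            rw [List.getElem_append_right (by omega)] at hv
            simp at hv
            exact hx hv.symm

-- bridge the range-existential to the Nat-existential
theorem pvRange_exists (arr : List String) (i : Int) (hi : 0 ≤ i) (v : String) :
    (∃ j ∈ PySem.List.pyRange (i + 1) (PySem.List.len arr) 1,
        PySem.List.pyGetD arr j "" = v)
      ↔ ∃ k : Nat, i < (k : Int) ∧ ∃ hk : k < arr.length, arr[k] = v := by
  constructor
  · rintro ⟨j, hj, hv⟩
    rw [PySem.List.mem_pyRange_one] at hj
    simp [PySem.List.len] at hj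
    have h0 : 0 ≤ j := by omega
    have h1 : j < (arr.length : Int) := by omega
    rw [PySem.List.pyGetD_eq_getElem arr "" h0 h1] at hv
    refine ⟨j.toNat, by omega, by omega, hv⟩
  · rintro ⟨k, hik, hk, hv⟩
    refine ⟨(k : Int), ?_, ?_⟩
    · rw [PySem.List.mem_pyRange_one]
      simp [PySem.List.len]
      omega
    · rw [PySem.List.pyGetD_eq_getElem arr "" (by omega) (by exact_mod_cast hk)]
      simpa using hv

-- ===== VERDICT (by name: the statement is the Claim_ definition above) =====
theorem symmetricPairs_spec : Claim_equal_symmetricPairs := by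
  intro arr _
  unfold Spec_symmetricPairs symmetricPairs symmetricPairs_alt
  rw [PySem.List.enumerate_eq_map_pyRange arr "", List.foldl_map, List.foldl_map]
  apply PySem.List.foldl_congr_mem
  intro acc i hi
  rw [PySem.List.mem_pyRange_one] at hi
  have hi0 : 0 ≤ i := hi.1
  rw [pvInnerA_eq, pvRev_slice]
  rw [if_congr (Iff.trans (pvRange_exists arr i hi0 (pvRev (PySem.List.pyGetD arr i "")))
        (pvLast_getD_gt arr (pvRev (PySem.List.pyGetD arr i "")) i hi0).symm) rfl rfl]
  rw [PySem.List.enumerate_eq_map_pyRange arr "", List.foldl_map]
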